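-- pv_equiv track=rewrite | github.com/rdwornik/corp-rfp-agent | src/kb_extract_historical.py | _col_idx
-- ===== SOURCE A (Python) =====
-- from typing import Optional
--
-- def _col_idx(letter: Optional[str]) -> int:
--     """Convert column letter (A, B, AA…) to 0-based index."""
--     if not letter:
--         return -1
--     letter = letter.strip().upper()
--     idx = 0
--     for ch in letter:
--         idx = idx * 26 + (ord(ch) - ord("A") + 1)
--     return idx - 1
-- ===== SOURCE B (Python) =====
-- from typing import Optional
--
-- def _col_idx(letter: Optional[str]) -> int:
--     """Convert column letter (A, B, AA...) to 0-based index."""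
--     if not letter:
--         return -1
--     s = letter.strip().upper()
--     digits = [ord(ch) - 64 for ch in s]
--     pows = [1]
--     for _ in range(len(digits) - 1):
--         pows.append(pows[-1] * 26)
--     return sum(d * p for d, p in zip(digits, reversed(pows))) - 1
-- ===== Notes on version B (the rewrite author's own statement) =====
-- stated objective: alternative
-- what changed: Replaces A's single Horner loop (idx = idx*26 + digit) with three staged passes: map each character to its base-26 digit, build the positional power list by repeated appending, then sum the zip of digits with the reversed power list.
import Mathlib
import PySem

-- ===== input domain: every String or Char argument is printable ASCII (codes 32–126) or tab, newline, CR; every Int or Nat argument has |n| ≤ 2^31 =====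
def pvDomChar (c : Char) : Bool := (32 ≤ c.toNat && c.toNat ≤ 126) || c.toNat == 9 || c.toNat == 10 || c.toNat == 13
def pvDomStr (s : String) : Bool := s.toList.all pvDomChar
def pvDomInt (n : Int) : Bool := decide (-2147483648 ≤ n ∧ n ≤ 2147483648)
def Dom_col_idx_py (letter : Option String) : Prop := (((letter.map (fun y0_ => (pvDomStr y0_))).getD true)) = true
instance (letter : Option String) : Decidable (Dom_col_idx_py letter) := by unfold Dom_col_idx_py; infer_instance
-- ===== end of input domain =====

-- B replaces A's single Horner loop with two staged passes (map to digits, then a positional-power sum over the enumerated list); alternative decomposition, same cost.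


-- ===== PORT A =====
-- for ch in letter: idx = idx * 26 + (ord(ch) - ord('A') + 1)
def col_idx_py (letter : Option String) : Int :=
  match letter with
  | none => -1
  | some s =>
    if s = "" then -1
    else
      let t := PySem.Chars.upper (PySem.Chars.strip s.toList)
      (t.foldl (fun idx c => idx * 26 + ((c.toNat : Int) - 65 + 1)) 0) - 1

-- ===== PORT B =====
-- digits = [ord(ch)-64 for ch in s]; pows = [1]; for _ in range(len(digits)-1): pows.append(pows[-1]*26);
-- return sum(d * p for d, p in zip(digits, reversed(pows))) - 1
def col_idx_py_alt (letter : Option String) : Int :=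
  match letter with
  | none => -1
  | some s =>
    if s = "" then -1
    else
      let digits : List Int :=
        (PySem.Chars.upper (PySem.Chars.strip s.toList)).map (fun c => (c.toNat : Int) - 64)
      let pows : List Int :=
        (List.range (digits.length - 1)).foldl (fun ps _ => ps ++ [ps.getLast! * 26]) [1]
      ((digits.zip pows.reverse).map (fun p => p.1 * p.2)).sum - 1

-- ===== PRECONDITION & SPEC =====
def Spec_col_idx_py (letter : Option String) (out : Int) : Prop := out = col_idx_py_alt letter
instance (letter : Option String) (out : Int) : Decidable (Spec_col_idx_py letter out) := by unfold Spec_col_idx_py; infer_instance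

-- ===== CLAIM (what is proved, stated in full; the proofs are below) =====
def Claim_equal_col_idx_py : Prop := ∀ (letter : Option String), Dom_col_idx_py letter → Spec_col_idx_py letter (col_idx_py letter)

-- ===== LEMMAS AND PROOFS =====

/-- The powers list B builds by repeated appending is `[26^0, …, 26^m]`. -/
theorem pows_spec (m : Nat) :
    (List.range m).foldl (fun ps _ => ps ++ [ps.getLast! * 26]) ([1] : List Int)
      = (List.range (m + 1)).map (fun i => (26 : Int) ^ i) := by
  induction m with
  | zero => simp
  | succ m ih =>
    rw [List.range_succ, List.foldl_append, ih, List.range_succ (n := m + 1)]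
    simp [List.range_succ, pow_succ]

/-- Summing digits against the reversed power list continues Horner evaluation from `a`. -/
theorem zipsum_eq_horner (ds : List Int) (a : Int) :
    a * (26 : Int) ^ ds.length
      + ((ds.zip (((List.range ds.length).map (fun i => (26 : Int) ^ i)).reverse)).map
          (fun p => p.1 * p.2)).sum
    = ds.foldl (fun x d => x * 26 + d) a := by
  induction ds generalizing a with
  | nil => simp
  | cons d t ih =>
    have hrev : (((List.range (t.length + 1)).map (fun i => (26 : Int) ^ i)).reverse)
        = (26 : Int) ^ t.length :: (((List.range t.length).map (fun i => (26 : Int) ^ i)).reverse) := by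
      rw [List.range_succ]; simp
    simp only [List.length_cons, hrev, List.zip_cons_cons, List.map_cons, List.sum_cons,
      List.foldl_cons]
    rw [← ih (a * 26 + d)]
    ring

-- ===== VERDICT (by name: the statement is the Claim_ definition above) =====
theorem col_idx_py_spec : Claim_equal_col_idx_py := by
  intro letter _
  unfold Spec_col_idx_py col_idx_py col_idx_py_alt
  match letter with
  | none => rfl
  | some s =>
    by_cases h : s = ""
    · simp [h]
    · simp only [if_neg h]
      rw [pows_spec]
      by_cases ht0 : PySem.Chars.upper (PySem.Chars.strip s.toList) = []
      · simp [ht0]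
      · have hpos : 1 ≤ (List.map (fun c => ((c.toNat : Int) - 64))
            (PySem.Chars.upper (PySem.Chars.strip s.toList))).length := by
          simp only [List.length_map]
          exact List.length_pos_of_ne_nil ht0
        rw [Nat.sub_add_cancel hpos]
        have hz := zipsum_eq_horner
          (List.map (fun c => ((c.toNat : Int) - 64)) (PySem.Chars.upper (PySem.Chars.strip s.toList))) 0
        rw [zero_mul, zero_add] at hz
        rw [hz, List.foldl_map]
        have hfun : (fun (x : Int) (c : Char) => x * 26 + ((c.toNat : Int) - 64))
            = (fun idx c => idx * 26 + ((c.toNat : Int) - 65 + 1)) := by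
          funext x c; ring
        rw [hfun]
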